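-- pv_equiv track=rewrite | github.com/RATHOD-SHUBHAM/DataStructure-And-Algorithm | Striver/Graph Series/BFS:DFS/Detect cycle in an directed graph/Single Cycle/a1.py | dfs
-- ===== SOURCE A (Python) =====
-- def dfs(startIdx, idx, visited, array, n):
--     # Basecase
--     if visited[idx] == True:
--         if idx == startIdx:
--             # if all the nodes have not been visited
--             if False in visited:
--                 return False
--             else:
--                 return True
--         else:
--             # if this is not the start idx - return False
--             return False
--
--     visited[idx] = True
--     value = array[idx]
--
--     # Get the next idx value
--     nxtIdx = (idx + value) % n
--
--     if  dfs(startIdx, nxtIdx, visited, array, n) == True: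
--             return True
--     else:
--         # unmark the node as visted for next iteration.
--         visited[idx] = False
--         return False
-- ===== SOURCE B (Python) =====
-- def dfs(startIdx, idx, visited, array, n):
--     # Iterative walk instead of recursion: follow the jumps, recording the
--     # nodes this call marks; on failure un-mark exactly those (same net
--     # mutation of `visited` as the recursive original).
--     marked = []
--     cur = idx
--     while not visited[cur]:
--         marked.append(cur)
--         visited[cur] = True
--         cur = (cur + array[cur]) % n
--     if cur == startIdx and False not in visited:
--         return True
--     for i in marked:
--         visited[i] = False
--     return False
-- ===== Notes on version B (the rewrite author's own statement) =====
-- stated objective: alternative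
-- what changed: Replaces A's recursion (which un-marks one node per unwinding stack frame) by a single iterative while-loop that follows the jumps, records the nodes it marks in a list, and un-marks them in one batch on failure; the success/failure test moves out of the base case to after the loop.
-- outside the precondition, e.g. on dfs(0, 0, [False], [0], 5): A returns True, B returns True
import Mathlib
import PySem

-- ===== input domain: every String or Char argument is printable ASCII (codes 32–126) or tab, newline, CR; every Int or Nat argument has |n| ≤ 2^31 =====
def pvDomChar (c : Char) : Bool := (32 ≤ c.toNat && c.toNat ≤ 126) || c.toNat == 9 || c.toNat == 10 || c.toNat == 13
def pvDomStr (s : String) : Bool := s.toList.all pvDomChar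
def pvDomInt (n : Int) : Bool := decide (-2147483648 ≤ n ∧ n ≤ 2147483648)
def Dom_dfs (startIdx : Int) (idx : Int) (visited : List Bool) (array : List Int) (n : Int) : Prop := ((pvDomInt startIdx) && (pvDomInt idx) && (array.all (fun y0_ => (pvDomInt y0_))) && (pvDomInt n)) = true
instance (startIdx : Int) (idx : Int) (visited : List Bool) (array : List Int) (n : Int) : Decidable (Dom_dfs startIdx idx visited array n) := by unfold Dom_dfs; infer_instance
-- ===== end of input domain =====

-- B replaces A's recursion-with-unwinding by a single iterative walk that records the nodes it
-- marks and un-marks them in one batch on failure (objective: alternative decomposition).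
-- Both A and B mutate `visited` identically in Python; the theorems here are about the return value.

-- Termination helper for both ports (cited by their decreasing_by): setting a cell that
-- Python-reads as False to True strictly decreases the number of False cells.
theorem countFalse_set_true_lt (xs : List Bool) (k : Nat) (h : xs[k]? = some false) :
    (xs.set k true).count false < xs.count false := by
  induction xs generalizing k with
  | nil => simp at h
  | cons a tl ih =>
    cases k with
    | zero =>
      simp_all
    | succ k =>
      simp only [List.getElem?_cons_succ] at h
      have := ih k h
      simp [List.count_cons]
      omega

theorem countFalse_pySetD_lt (xs : List Bool) (i : Int)
    (h : PySem.List.pyGet? xs i = some false) :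
    (PySem.List.pySetD xs i true).count false < xs.count false := by
  simp only [PySem.List.pyGet?, PySem.List.pySetD, PySem.List.pySet?, Option.bind_eq_some_iff] at h ⊢
  obtain ⟨k, hk, hget⟩ := h
  rw [hk]
  exact countFalse_set_true_lt xs k hget

-- ===== PORT A =====
def dfs (startIdx : Int) (idx : Int) (visited : List Bool) (array : List Int) (n : Int) : Bool :=
  match h : PySem.List.pyGet? visited idx with
  | some true =>                                 -- if visited[idx] == True:
      if idx = startIdx then
        if false ∈ visited then false else true  -- 'False in visited'
      else false
  | some false =>
      let visited' := PySem.List.pySetD visited idx true   -- visited[idx] = True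
      match PySem.List.pyGet? array idx with               -- value = array[idx]
      | some value =>
          if n = 0 then false                    -- ZeroDivisionError: outside Pre_
          else if dfs startIdx (PySem.Int.mod (idx + value) n) visited' array n = true then true
          else false                             -- (Python also un-marks visited[idx] here)
      | none => false                            -- IndexError: outside Pre_
  | none => false                                -- IndexError: outside Pre_
termination_by visited.count false
decreasing_by exact countFalse_pySetD_lt visited idx h

-- ===== PORT B =====
-- the while loop: returns (marked, visited, cur) at the first already-visited (or junk) stop
def dfsWalk_alt (cur : Int) (visited : List Bool) (marked : List Int) (array : List Int) (n : Int) :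
    List Int × List Bool × Int :=
  match h : PySem.List.pyGet? visited cur with
  | some false =>
      let marked' := marked ++ [cur]                        -- marked.append(cur)
      let visited' := PySem.List.pySetD visited cur true    -- visited[cur] = True
      match PySem.List.pyGet? array cur with
      | some v =>
          if n = 0 then (marked', visited', cur)            -- ZeroDivisionError: outside Pre_
          else dfsWalk_alt (PySem.Int.mod (cur + v) n) visited' marked' array n
      | none => (marked', visited', cur)                    -- IndexError: outside Pre_
  | _ => (marked, visited, cur)                             -- loop exit (none = IndexError: outside Pre_)
termination_by visited.count false
decreasing_by exact countFalse_pySetD_lt visited cur h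

def dfs_alt (startIdx : Int) (idx : Int) (visited : List Bool) (array : List Int) (n : Int) : Bool :=
  let r := dfsWalk_alt idx visited [] array n
  if r.2.2 = startIdx ∧ false ∉ r.2.1 then true
  else false    -- (in Python this branch un-marks the nodes in r.1; mutation only, not the result)

-- ===== PRECONDITION & SPEC =====
-- Pre_ conservatively excludes the inputs where the walk can raise IndexError/ZeroDivisionError:
-- a start index outside Python's index range, and (unless the first node is already visited, where
-- A returns without ever indexing `array` or taking a modulo) n = 0 or |n| above a list length;
-- on a few such inputs the walk happens to stay in range by luck and A still returns — see the cite.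
def Pre_dfs (startIdx : Int) (idx : Int) (visited : List Bool) (array : List Int) (n : Int) : Prop :=
  PySem.Raise.InRange visited.length idx ∧
    (PySem.List.pyGet? visited idx = some true ∨
      (PySem.Raise.InRange array.length idx ∧ n ≠ 0 ∧
        n.natAbs ≤ visited.length ∧ n.natAbs ≤ array.length))
instance (startIdx : Int) (idx : Int) (visited : List Bool) (array : List Int) (n : Int) : Decidable (Pre_dfs startIdx idx visited array n) := by unfold Pre_dfs; infer_instance

def pvWitness_dfs : Int × Int × List Bool × List Int × Int := (0, 0, [false, false], [1, 1], 2)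

def Spec_dfs (startIdx : Int) (idx : Int) (visited : List Bool) (array : List Int) (n : Int) (out : Bool) : Prop := out = dfs_alt startIdx idx visited array n
instance (startIdx : Int) (idx : Int) (visited : List Bool) (array : List Int) (n : Int) (out : Bool) : Decidable (Spec_dfs startIdx idx visited array n out) := by unfold Spec_dfs; infer_instance

-- ===== CLAIM (what is proved, stated in full; the proofs are below) =====
def Claim_equal_dfs : Prop := ∀ (startIdx : Int) (idx : Int) (visited : List Bool) (array : List Int) (n : Int), Dom_dfs startIdx idx visited array n → Pre_dfs startIdx idx visited array n → Spec_dfs startIdx idx visited array n (dfs startIdx idx visited array n)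

-- ===== LEMMAS AND PROOFS =====

-- A's recursion equals B's walk followed by B's final test, for any accumulated `marked`.
theorem dfs_eq_walk (startIdx : Int) (array : List Int) (n : Int)
    (hn : n ≠ 0) :
    ∀ (k : Nat) (visited : List Bool) (idx : Int) (marked : List Int),
      visited.count false ≤ k →
      PySem.Raise.InRange visited.length idx →
      PySem.Raise.InRange array.length idx →
      n.natAbs ≤ visited.length →
      n.natAbs ≤ array.length →
      dfs startIdx idx visited array n =
        (let r := dfsWalk_alt idx visited marked array n
         if r.2.2 = startIdx ∧ false ∉ r.2.1 then true else false) := by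
  intro k
  induction k with
  | zero =>
    intro visited idx marked hcnt hrange hrangeA hnabs hnabsA
    cases h : PySem.List.pyGet? visited idx with
    | none =>
      rw [PySem.List.pyGet?_eq_none_iff] at h
      exact absurd hrange h
    | some b =>
      cases b with
      | true =>
        have hw : dfsWalk_alt idx visited marked array n = (marked, visited, idx) := by
          rw [dfsWalk_alt.eq_def]; split <;> simp_all
        rw [dfs.eq_def]
        simp only [hw]
        split <;> simp_all
      | false =>
        have : false ∈ visited := PySem.List.mem_of_pyGet?_eq_some visited h
        have : 0 < visited.count false := List.count_pos_iff.mpr this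
        omega
  | succ k ih =>
    intro visited idx marked hcnt hrange hrangeA hnabs hnabsA
    cases h : PySem.List.pyGet? visited idx with
    | none =>
      rw [PySem.List.pyGet?_eq_none_iff] at h
      exact absurd hrange h
    | some b =>
      cases b with
      | true =>
        have hw : dfsWalk_alt idx visited marked array n = (marked, visited, idx) := by
          rw [dfsWalk_alt.eq_def]; split <;> simp_all
        rw [dfs.eq_def]
        simp only [hw]
        split <;> simp_all
      | false =>
        cases ha : PySem.List.pyGet? array idx with
        | none =>
          rw [PySem.List.pyGet?_eq_none_iff] at ha
          exact absurd hrangeA ha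
        | some value =>
          have hcnt' : (PySem.List.pySetD visited idx true).count false ≤ k := by
            have := countFalse_pySetD_lt visited idx h
            omega
          have hnabs' : n.natAbs ≤ (PySem.List.pySetD visited idx true).length := by
            rw [PySem.List.length_pySetD]; exact hnabs
          have hmodBounds : ∀ (L : Nat), n.natAbs ≤ L →
              PySem.Raise.InRange L (PySem.Int.mod (idx + value) n) := by
            intro L hL
            rcases lt_or_gt_of_ne hn with hneg | hpos
            · have := PySem.Int.mod_neg_bounds (idx + value) hneg
              constructor <;> omega
            · have h1 := PySem.Int.mod_nonneg (idx + value) hpos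
              have h2 := PySem.Int.mod_lt (idx + value) hpos
              constructor <;> omega
          have hrange' : PySem.Raise.InRange (PySem.List.pySetD visited idx true).length
              (PySem.Int.mod (idx + value) n) := by
            rw [PySem.List.length_pySetD]; exact hmodBounds _ hnabs
          have key := ih (PySem.List.pySetD visited idx true) (PySem.Int.mod (idx + value) n)
            (marked ++ [idx]) hcnt' hrange' (hmodBounds _ hnabsA) hnabs' hnabsA
          have hw : dfsWalk_alt idx visited marked array n =
              dfsWalk_alt (PySem.Int.mod (idx + value) n) (PySem.List.pySetD visited idx true)
                (marked ++ [idx]) array n := by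
            rw [dfsWalk_alt.eq_def]; split <;> simp_all
          rw [dfs.eq_def]
          simp only [hw]
          split <;> simp_all

-- ===== VERDICT (by name: the statement is the Claim_ definition above) =====
theorem dfs_spec : Claim_equal_dfs := by
  intro startIdx idx visited array n _ hpre
  obtain ⟨hrange, hrest⟩ := hpre
  unfold Spec_dfs
  rcases hrest with h | ⟨hrangeA, hn, hnabs, hnabsA⟩
  · -- first node already visited: both sides stop immediately
    rw [dfs.eq_def]
    unfold dfs_alt
    rw [dfsWalk_alt.eq_def]
    split <;> simp_all
  · exact dfs_eq_walk startIdx array n hn (visited.count false) visited idx [] le_rfl hrange hrangeA hnabs hnabsA
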